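-- pv_equiv track=rewrite | github.com/tazmattar/flight-board | vatsim_fetcher.py | get_checkin_area
-- ===== SOURCE A (Python) =====
-- def get_checkin_area(callsign, airport_code):
--     """Get check-in desk/row assignment"""
--     if not callsign: return ""
--
--     seed = sum(ord(c) for c in callsign)
--     airline = callsign[:3].upper()
--
--     # Use configured logic for pre-configured airports
--     if airport_code == 'LSZH':
--         if airline in ['SWR', 'EDW', 'DLH', 'AUA', 'BEL', 'CTN', 'AEE', 'DLA']:
--             return "1"
--         if airline in ['EZY', 'EZS', 'PGT', 'BTI']:
--             return "3"
--         return "2"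
--
--     elif airport_code == 'LSGG':
--         if airline in ['EXS', 'TOM', 'TRA', 'JAI']:
--             desk = (seed % 10) + 80
--             return f"T2-{desk}"
--         if airline == 'AFR':
--             desk = (seed % 8) + 70
--             return f"F{desk}"
--         if airline in ['SWR', 'LX', 'EDW', 'DLH', 'UAE', 'ETD', 'QTR']:
--             desk = (seed % 15) + 1
--             return f"{desk:02d}"
--         desk = (seed % 30) + 20
--         return f"{desk:02d}"
--
--     elif airport_code == 'LFSB':
--         if airline in ['AFR', 'WZZ', 'RYR', 'ENT']:
--             desk = (seed % 15) + 60
--             return f"F{desk}"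
--         desk = (seed % 40) + 1
--         return f"{desk:02d}"
--
--     elif airport_code == 'EGLL':
--         if airline in ['BAW', 'SHT', 'IBE', 'AAL', 'AER', 'EIN']:
--             desk = (seed % 40) + 501
--             return f"{desk}"
--         if airline in ['DLH', 'SWR', 'AUA', 'SAS', 'UAL', 'ACA', 'SIA',
--                     'THA', 'ANA', 'UAE', 'QFA', 'VIR', 'DAL', 'LOT']:
--             desk = (seed % 30) + 301
--             return f"{desk}"
--         if airline in ['KLM', 'AFR', 'CES', 'KQA', 'ETD', 'MAS', 'RAM']:
--             desk = (seed % 25) + 401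
--             return f"{desk}"
--         if airline in ['BEL', 'TAP', 'AIC', 'LH', 'AUA']:
--             desk = (seed % 20) + 201
--             return f"{desk}"
--         desk = (seed % 20) + 221
--         return f"{desk}"
--
--     elif airport_code == 'KJFK':
--         if airline in ['DLH', 'LH', 'SWR', 'LX', 'AUA', 'OS', 'BEL', 'SN',
--                     'AFR', 'AF', 'KLM', 'KL', 'JAL', 'JL', 'KAL', 'KE']:
--             row = ((seed % 8) + 1)
--             return f"T1-{row}"
--         if airline in ['DAL', 'DL', 'AFR', 'AF', 'KLM', 'KL', 'AZA', 'AZ',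
--                     'CES', 'MU', 'KQA', 'KQ', 'SVA', 'SV', 'ETD', 'EY',
--                     'VIR', 'VS', 'UAL', 'UA']:
--             if airline in ['VIR', 'VS', 'KQA', 'KQ']:
--                 return f"T4-6"
--             else:
--                 rows = ['1', '1A', '2', '3', '4', '5', '6', '7']
--                 return f"T4-{rows[seed % len(rows)]}"
--         if airline in ['JBU', 'B6', 'EIN', 'EI', 'SYX', 'SY']:
--             row = ((seed % 4) + 1)
--             return f"T5-{row}"
--         if airline in ['BAW', 'BA', 'IBE', 'IB', 'ASA', 'AS', 'EWG', 'EW',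
--                     'ICE', 'FI', 'UAE', 'EK']:
--             if airline in ['EWG', 'EW']:
--                 return f"T7-C"
--             else:
--                 rows = ['2', '3', '4', '5', '6', 'C']
--                 return f"T7-{rows[seed % len(rows)]}"
--         if airline in ['AAL', 'AA', 'BAW', 'BA', 'QTR', 'QR', 'CPA', 'CX',
--                     'JAL', 'JL', 'FJI', 'FJ']:
--             if airline in ['QTR', 'QR']:
--                 return f"T8-5"
--             else:
--                 rows = ['1', '2', '3', '4', '5', '6']
--                 return f"T8-{rows[seed % len(rows)]}"
--         row = ((seed % 7) + 1)
--         return f"T4-{row}"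
--
--     # Generic check-in for unconfigured/dynamic airports
--     desk = (seed % 20) + 1
--     return f"{desk:02d}"
-- ===== SOURCE B (Python) =====
-- # First-match rule table: per airport an ordered list of (space-joined airline
-- # names, formatter function), scanned generically; nested sub-specials hoisted
-- # as earlier rules to keep first-match precedence.
--
-- _GENERIC = lambda s: f"{(s % 20) + 1:02d}"
--
-- _AIRPORTS = {
--     'LSZH': ([
--         ("SWR EDW DLH AUA BEL CTN AEE DLA", lambda s: "1"),
--         ("EZY EZS PGT BTI", lambda s: "3"),
--     ], lambda s: "2"),
--     'LSGG': ([
--         ("EXS TOM TRA JAI", lambda s: f"T2-{(s % 10) + 80}"),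
--         ("AFR", lambda s: f"F{(s % 8) + 70}"),
--         ("SWR LX EDW DLH UAE ETD QTR", lambda s: f"{(s % 15) + 1:02d}"),
--     ], lambda s: f"{(s % 30) + 20:02d}"),
--     'LFSB': ([
--         ("AFR WZZ RYR ENT", lambda s: f"F{(s % 15) + 60}"),
--     ], lambda s: f"{(s % 40) + 1:02d}"),
--     'EGLL': ([
--         ("BAW SHT IBE AAL AER EIN", lambda s: f"{(s % 40) + 501}"),
--         ("DLH SWR AUA SAS UAL ACA SIA THA ANA UAE QFA VIR DAL LOT",
--          lambda s: f"{(s % 30) + 301}"),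
--         ("KLM AFR CES KQA ETD MAS RAM", lambda s: f"{(s % 25) + 401}"),
--         ("BEL TAP AIC LH AUA", lambda s: f"{(s % 20) + 201}"),
--     ], lambda s: f"{(s % 20) + 221}"),
--     'KJFK': ([
--         ("DLH LH SWR LX AUA OS BEL SN AFR AF KLM KL JAL JL KAL KE",
--          lambda s: f"T1-{(s % 8) + 1}"),
--         ("VIR VS KQA KQ", lambda s: "T4-6"),
--         ("DAL DL AFR AF KLM KL AZA AZ CES MU KQA KQ SVA SV ETD EY VIR VS UAL UA",
--          lambda s: "T4-" + ['1', '1A', '2', '3', '4', '5', '6', '7'][s % 8]),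
--         ("JBU B6 EIN EI SYX SY", lambda s: f"T5-{(s % 4) + 1}"),
--         ("EWG EW", lambda s: "T7-C"),
--         ("BAW BA IBE IB ASA AS EWG EW ICE FI UAE EK",
--          lambda s: "T7-" + ['2', '3', '4', '5', '6', 'C'][s % 6]),
--         ("QTR QR", lambda s: "T8-5"),
--         ("AAL AA BAW BA QTR QR CPA CX JAL JL FJI FJ",
--          lambda s: "T8-" + ['1', '2', '3', '4', '5', '6'][s % 6]),
--     ], lambda s: f"T4-{(s % 7) + 1}"),
-- }
--
--
-- def _scan(rules, default, airline, seed):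
--     for names, fmt in rules:
--         if airline in names.split():
--             return fmt(seed)
--     return default(seed)
--
--
-- def get_checkin_area(callsign, airport_code):
--     """Get check-in desk/row assignment"""
--     if not callsign:
--         return ""
--     seed = sum(ord(c) for c in callsign)
--     airline = callsign[:3].upper()
--     rules, default = _AIRPORTS.get(airport_code, ([], _GENERIC))
--     return _scan(rules, default, airline, seed)
-- ===== Notes on version B (the rewrite author's own statement) =====
-- stated objective: simpler
-- what changed: Replaces the nested if/elif branch dispatch by a data-driven table (airport -> ordered list of (space-joined airline names, formatter lambda) rules, with the nested sub-specials hoisted into earlier first-match rules) scanned by one generic first-match loop testing membership in names.split().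
import Mathlib
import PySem

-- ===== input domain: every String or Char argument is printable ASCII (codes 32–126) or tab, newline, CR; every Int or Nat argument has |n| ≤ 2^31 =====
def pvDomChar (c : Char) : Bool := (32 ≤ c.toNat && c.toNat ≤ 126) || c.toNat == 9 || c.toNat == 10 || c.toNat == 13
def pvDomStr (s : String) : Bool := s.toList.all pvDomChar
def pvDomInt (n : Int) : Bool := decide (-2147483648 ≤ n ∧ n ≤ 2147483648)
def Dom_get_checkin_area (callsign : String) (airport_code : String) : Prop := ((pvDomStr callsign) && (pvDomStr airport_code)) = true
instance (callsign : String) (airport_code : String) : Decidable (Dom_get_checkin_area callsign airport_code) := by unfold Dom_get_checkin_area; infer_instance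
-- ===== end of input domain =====

-- B replaces A's nested if/elif dispatch by a first-match rule table (space-joined airline strings + formatter lambdas) scanned by one generic loop (objective: simpler, data-driven; same cost).


-- ===== PORT A =====
-- shared helpers: f"{d:02d}" for the nonnegative desk numbers = str(d).zfill(2);
-- seed = sum(ord(c) for c in callsign); airline = callsign[:3].upper()
def pvPad2 (d : Int) : String := PySem.Str.zfill (PySem.Int.toStr d) 2
def pvSeed (callsign : String) : Int := callsign.toList.foldl (fun a c => a + (c.toNat : Int)) 0
def pvAirline (callsign : String) : String := PySem.Str.upper (PySem.Str.slice callsign none (some 3))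

def get_checkin_area (callsign : String) (airport_code : String) : String :=
  if callsign = "" then "" else
  if airport_code = "LSZH" then
    if (["SWR", "EDW", "DLH", "AUA", "BEL", "CTN", "AEE", "DLA"]).contains (pvAirline callsign) then "1"
    else if (["EZY", "EZS", "PGT", "BTI"]).contains (pvAirline callsign) then "3"
    else "2"
  else if airport_code = "LSGG" then
    if (["EXS", "TOM", "TRA", "JAI"]).contains (pvAirline callsign) then
      "T2-" ++ PySem.Int.toStr (PySem.Int.mod (pvSeed callsign) 10 + 80)
    else if pvAirline callsign = "AFR" then
      "F" ++ PySem.Int.toStr (PySem.Int.mod (pvSeed callsign) 8 + 70)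
    else if (["SWR", "LX", "EDW", "DLH", "UAE", "ETD", "QTR"]).contains (pvAirline callsign) then
      pvPad2 (PySem.Int.mod (pvSeed callsign) 15 + 1)
    else pvPad2 (PySem.Int.mod (pvSeed callsign) 30 + 20)
  else if airport_code = "LFSB" then
    if (["AFR", "WZZ", "RYR", "ENT"]).contains (pvAirline callsign) then
      "F" ++ PySem.Int.toStr (PySem.Int.mod (pvSeed callsign) 15 + 60)
    else pvPad2 (PySem.Int.mod (pvSeed callsign) 40 + 1)
  else if airport_code = "EGLL" then
    if (["BAW", "SHT", "IBE", "AAL", "AER", "EIN"]).contains (pvAirline callsign) then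
      PySem.Int.toStr (PySem.Int.mod (pvSeed callsign) 40 + 501)
    else if (["DLH", "SWR", "AUA", "SAS", "UAL", "ACA", "SIA",
              "THA", "ANA", "UAE", "QFA", "VIR", "DAL", "LOT"]).contains (pvAirline callsign) then
      PySem.Int.toStr (PySem.Int.mod (pvSeed callsign) 30 + 301)
    else if (["KLM", "AFR", "CES", "KQA", "ETD", "MAS", "RAM"]).contains (pvAirline callsign) then
      PySem.Int.toStr (PySem.Int.mod (pvSeed callsign) 25 + 401)
    else if (["BEL", "TAP", "AIC", "LH", "AUA"]).contains (pvAirline callsign) then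
      PySem.Int.toStr (PySem.Int.mod (pvSeed callsign) 20 + 201)
    else PySem.Int.toStr (PySem.Int.mod (pvSeed callsign) 20 + 221)
  else if airport_code = "KJFK" then
    if (["DLH", "LH", "SWR", "LX", "AUA", "OS", "BEL", "SN",
         "AFR", "AF", "KLM", "KL", "JAL", "JL", "KAL", "KE"]).contains (pvAirline callsign) then
      "T1-" ++ PySem.Int.toStr (PySem.Int.mod (pvSeed callsign) 8 + 1)
    else if (["DAL", "DL", "AFR", "AF", "KLM", "KL", "AZA", "AZ",
              "CES", "MU", "KQA", "KQ", "SVA", "SV", "ETD", "EY",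
              "VIR", "VS", "UAL", "UA"]).contains (pvAirline callsign) then
      if (["VIR", "VS", "KQA", "KQ"]).contains (pvAirline callsign) then "T4-6"
      else "T4-" ++ PySem.List.pyGetD ["1", "1A", "2", "3", "4", "5", "6", "7"]
                      (PySem.Int.mod (pvSeed callsign) ((["1", "1A", "2", "3", "4", "5", "6", "7"] : List String).length : Int)) ""
    else if (["JBU", "B6", "EIN", "EI", "SYX", "SY"]).contains (pvAirline callsign) then
      "T5-" ++ PySem.Int.toStr (PySem.Int.mod (pvSeed callsign) 4 + 1)
    else if (["BAW", "BA", "IBE", "IB", "ASA", "AS", "EWG", "EW",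
              "ICE", "FI", "UAE", "EK"]).contains (pvAirline callsign) then
      if (["EWG", "EW"]).contains (pvAirline callsign) then "T7-C"
      else "T7-" ++ PySem.List.pyGetD ["2", "3", "4", "5", "6", "C"]
                      (PySem.Int.mod (pvSeed callsign) ((["2", "3", "4", "5", "6", "C"] : List String).length : Int)) ""
    else if (["AAL", "AA", "BAW", "BA", "QTR", "QR", "CPA", "CX",
              "JAL", "JL", "FJI", "FJ"]).contains (pvAirline callsign) then
      if (["QTR", "QR"]).contains (pvAirline callsign) then "T8-5"
      else "T8-" ++ PySem.List.pyGetD ["1", "2", "3", "4", "5", "6"]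
                      (PySem.Int.mod (pvSeed callsign) ((["1", "2", "3", "4", "5", "6"] : List String).length : Int)) ""
    else "T4-" ++ PySem.Int.toStr (PySem.Int.mod (pvSeed callsign) 7 + 1)
  else pvPad2 (PySem.Int.mod (pvSeed callsign) 20 + 1)

-- ===== PORT B =====
-- rule = (space-joined airline names, formatter lambda over seed); membership by names.split()
def pvGeneric : Int → String := fun s => pvPad2 (PySem.Int.mod s 20 + 1)

def pvTable : List (String × (List (String × (Int → String)) × (Int → String))) :=
  [("LSZH",
    ([("SWR EDW DLH AUA BEL CTN AEE DLA", fun _ => "1"),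
      ("EZY EZS PGT BTI", fun _ => "3")],
     fun _ => "2")),
   ("LSGG",
    ([("EXS TOM TRA JAI", fun s => "T2-" ++ PySem.Int.toStr (PySem.Int.mod s 10 + 80)),
      ("AFR", fun s => "F" ++ PySem.Int.toStr (PySem.Int.mod s 8 + 70)),
      ("SWR LX EDW DLH UAE ETD QTR", fun s => pvPad2 (PySem.Int.mod s 15 + 1))],
     fun s => pvPad2 (PySem.Int.mod s 30 + 20))),
   ("LFSB",
    ([("AFR WZZ RYR ENT", fun s => "F" ++ PySem.Int.toStr (PySem.Int.mod s 15 + 60))],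
     fun s => pvPad2 (PySem.Int.mod s 40 + 1))),
   ("EGLL",
    ([("BAW SHT IBE AAL AER EIN", fun s => PySem.Int.toStr (PySem.Int.mod s 40 + 501)),
      ("DLH SWR AUA SAS UAL ACA SIA THA ANA UAE QFA VIR DAL LOT",
       fun s => PySem.Int.toStr (PySem.Int.mod s 30 + 301)),
      ("KLM AFR CES KQA ETD MAS RAM", fun s => PySem.Int.toStr (PySem.Int.mod s 25 + 401)),
      ("BEL TAP AIC LH AUA", fun s => PySem.Int.toStr (PySem.Int.mod s 20 + 201))],
     fun s => PySem.Int.toStr (PySem.Int.mod s 20 + 221))),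
   ("KJFK",
    ([("DLH LH SWR LX AUA OS BEL SN AFR AF KLM KL JAL JL KAL KE",
       fun s => "T1-" ++ PySem.Int.toStr (PySem.Int.mod s 8 + 1)),
      ("VIR VS KQA KQ", fun _ => "T4-6"),
      ("DAL DL AFR AF KLM KL AZA AZ CES MU KQA KQ SVA SV ETD EY VIR VS UAL UA",
       fun s => "T4-" ++ PySem.List.pyGetD ["1", "1A", "2", "3", "4", "5", "6", "7"] (PySem.Int.mod s 8) ""),
      ("JBU B6 EIN EI SYX SY", fun s => "T5-" ++ PySem.Int.toStr (PySem.Int.mod s 4 + 1)),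
      ("EWG EW", fun _ => "T7-C"),
      ("BAW BA IBE IB ASA AS EWG EW ICE FI UAE EK",
       fun s => "T7-" ++ PySem.List.pyGetD ["2", "3", "4", "5", "6", "C"] (PySem.Int.mod s 6) ""),
      ("QTR QR", fun _ => "T8-5"),
      ("AAL AA BAW BA QTR QR CPA CX JAL JL FJI FJ",
       fun s => "T8-" ++ PySem.List.pyGetD ["1", "2", "3", "4", "5", "6"] (PySem.Int.mod s 6) "")],
     fun s => "T4-" ++ PySem.Int.toStr (PySem.Int.mod s 7 + 1)))]

def pvScan (rules : List (String × (Int → String))) (dflt : Int → String) (airline : String) (seed : Int) : String :=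
  match rules with
  | [] => dflt seed
  | (names, fmt) :: rest =>
      if (PySem.Str.split₀ names).contains airline then fmt seed
      else pvScan rest dflt airline seed

def get_checkin_area_alt (callsign : String) (airport_code : String) : String :=
  if callsign = "" then "" else
  match List.lookup airport_code pvTable with
  | some (rules, dflt) => pvScan rules dflt (pvAirline callsign) (pvSeed callsign)
  | none => pvScan [] pvGeneric (pvAirline callsign) (pvSeed callsign)

-- ===== PRECONDITION & SPEC =====
def Spec_get_checkin_area (callsign : String) (airport_code : String) (out : String) : Prop := out = get_checkin_area_alt callsign airport_code
instance (callsign : String) (airport_code : String) (out : String) : Decidable (Spec_get_checkin_area callsign airport_code out) := by unfold Spec_get_checkin_area; infer_instance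

-- ===== CLAIM (what is proved, stated in full; the proofs are below) =====
def Claim_equal_get_checkin_area : Prop := ∀ (callsign : String) (airport_code : String), Dom_get_checkin_area callsign airport_code → Spec_get_checkin_area callsign airport_code (get_checkin_area callsign airport_code)

-- ===== LEMMAS AND PROOFS =====

-- hoisting a first-match rule out of a later rule's body is sound when its airline set is a subset
theorem pv_ite_nest {a : Type} (p q : Prop) [Decidable p] [Decidable q] (h : p → q) (x r e : a) :
    (if p then x else if q then r else e) = (if q then (if p then x else r) else e) := by
  by_cases hp : p <;> by_cases hq : q <;> simp_all

theorem pv_ite_cond {a : Type} (p q : Prop) [Decidable p] [Decidable q] (h : p ↔ q) (x e : a) :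
    (if p then x else e) = (if q then x else e) := by
  by_cases hp : p <;> simp_all

theorem pv_sub4 (al : String) : (["VIR", "VS", "KQA", "KQ"]).contains al = true →
    (["DAL", "DL", "AFR", "AF", "KLM", "KL", "AZA", "AZ",
      "CES", "MU", "KQA", "KQ", "SVA", "SV", "ETD", "EY",
      "VIR", "VS", "UAL", "UA"]).contains al = true := by
  simp only [List.contains_eq_mem, List.mem_cons, List.not_mem_nil, or_false, decide_eq_true_eq]
  tauto

theorem pv_sub7 (al : String) : (["EWG", "EW"]).contains al = true →
    (["BAW", "BA", "IBE", "IB", "ASA", "AS", "EWG", "EW",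
      "ICE", "FI", "UAE", "EK"]).contains al = true := by
  simp only [List.contains_eq_mem, List.mem_cons, List.not_mem_nil, or_false, decide_eq_true_eq]
  tauto

theorem pv_sub8 (al : String) : (["QTR", "QR"]).contains al = true →
    (["AAL", "AA", "BAW", "BA", "QTR", "QR", "CPA", "CX",
      "JAL", "JL", "FJI", "FJ"]).contains al = true := by
  simp only [List.contains_eq_mem, List.mem_cons, List.not_mem_nil, or_false, decide_eq_true_eq]
  tauto

theorem pv_lsgg (airline : String) (seed : Int) :
    pvScan [("EXS TOM TRA JAI", fun s => "T2-" ++ PySem.Int.toStr (PySem.Int.mod s 10 + 80)),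
      ("AFR", fun s => "F" ++ PySem.Int.toStr (PySem.Int.mod s 8 + 70)),
      ("SWR LX EDW DLH UAE ETD QTR", fun s => pvPad2 (PySem.Int.mod s 15 + 1))]
      (fun s => pvPad2 (PySem.Int.mod s 30 + 20)) airline seed =
    (if (["EXS", "TOM", "TRA", "JAI"]).contains airline then
      "T2-" ++ PySem.Int.toStr (PySem.Int.mod seed 10 + 80)
    else if airline = "AFR" then
      "F" ++ PySem.Int.toStr (PySem.Int.mod seed 8 + 70)
    else if (["SWR", "LX", "EDW", "DLH", "UAE", "ETD", "QTR"]).contains airline then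
      pvPad2 (PySem.Int.mod seed 15 + 1)
    else pvPad2 (PySem.Int.mod seed 30 + 20)) := by
  simp only [pvScan,
    show PySem.Str.split₀ "EXS TOM TRA JAI" = ["EXS", "TOM", "TRA", "JAI"] from by decide,
    show PySem.Str.split₀ "AFR" = ["AFR"] from by decide,
    show PySem.Str.split₀ "SWR LX EDW DLH UAE ETD QTR" = ["SWR", "LX", "EDW", "DLH", "UAE", "ETD", "QTR"] from by decide]
  rw [pv_ite_cond ((["AFR"] : List String).contains airline = true) (airline = "AFR") (by simp) _ _]

theorem pv_kjfk (airline : String) (seed : Int) :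
    pvScan [("DLH LH SWR LX AUA OS BEL SN AFR AF KLM KL JAL JL KAL KE",
       fun s => "T1-" ++ PySem.Int.toStr (PySem.Int.mod s 8 + 1)),
      ("VIR VS KQA KQ", fun _ => "T4-6"),
      ("DAL DL AFR AF KLM KL AZA AZ CES MU KQA KQ SVA SV ETD EY VIR VS UAL UA",
       fun s => "T4-" ++ PySem.List.pyGetD ["1", "1A", "2", "3", "4", "5", "6", "7"] (PySem.Int.mod s 8) ""),
      ("JBU B6 EIN EI SYX SY", fun s => "T5-" ++ PySem.Int.toStr (PySem.Int.mod s 4 + 1)),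
      ("EWG EW", fun _ => "T7-C"),
      ("BAW BA IBE IB ASA AS EWG EW ICE FI UAE EK",
       fun s => "T7-" ++ PySem.List.pyGetD ["2", "3", "4", "5", "6", "C"] (PySem.Int.mod s 6) ""),
      ("QTR QR", fun _ => "T8-5"),
      ("AAL AA BAW BA QTR QR CPA CX JAL JL FJI FJ",
       fun s => "T8-" ++ PySem.List.pyGetD ["1", "2", "3", "4", "5", "6"] (PySem.Int.mod s 6) "")]
      (fun s => "T4-" ++ PySem.Int.toStr (PySem.Int.mod s 7 + 1)) airline seed =
    (if (["DLH", "LH", "SWR", "LX", "AUA", "OS", "BEL", "SN",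
         "AFR", "AF", "KLM", "KL", "JAL", "JL", "KAL", "KE"]).contains airline then
      "T1-" ++ PySem.Int.toStr (PySem.Int.mod seed 8 + 1)
    else if (["DAL", "DL", "AFR", "AF", "KLM", "KL", "AZA", "AZ",
              "CES", "MU", "KQA", "KQ", "SVA", "SV", "ETD", "EY",
              "VIR", "VS", "UAL", "UA"]).contains airline then
      if (["VIR", "VS", "KQA", "KQ"]).contains airline then "T4-6"
      else "T4-" ++ PySem.List.pyGetD ["1", "1A", "2", "3", "4", "5", "6", "7"]
                      (PySem.Int.mod seed ((["1", "1A", "2", "3", "4", "5", "6", "7"] : List String).length : Int)) ""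
    else if (["JBU", "B6", "EIN", "EI", "SYX", "SY"]).contains airline then
      "T5-" ++ PySem.Int.toStr (PySem.Int.mod seed 4 + 1)
    else if (["BAW", "BA", "IBE", "IB", "ASA", "AS", "EWG", "EW",
              "ICE", "FI", "UAE", "EK"]).contains airline then
      if (["EWG", "EW"]).contains airline then "T7-C"
      else "T7-" ++ PySem.List.pyGetD ["2", "3", "4", "5", "6", "C"]
                      (PySem.Int.mod seed ((["2", "3", "4", "5", "6", "C"] : List String).length : Int)) ""
    else if (["AAL", "AA", "BAW", "BA", "QTR", "QR", "CPA", "CX",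
              "JAL", "JL", "FJI", "FJ"]).contains airline then
      if (["QTR", "QR"]).contains airline then "T8-5"
      else "T8-" ++ PySem.List.pyGetD ["1", "2", "3", "4", "5", "6"]
                      (PySem.Int.mod seed ((["1", "2", "3", "4", "5", "6"] : List String).length : Int)) ""
    else "T4-" ++ PySem.Int.toStr (PySem.Int.mod seed 7 + 1)) := by
  simp only [pvScan,
    show PySem.Str.split₀ "DLH LH SWR LX AUA OS BEL SN AFR AF KLM KL JAL JL KAL KE" =
      ["DLH", "LH", "SWR", "LX", "AUA", "OS", "BEL", "SN", "AFR", "AF", "KLM", "KL", "JAL", "JL", "KAL", "KE"] from by decide,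
    show PySem.Str.split₀ "VIR VS KQA KQ" = ["VIR", "VS", "KQA", "KQ"] from by decide,
    show PySem.Str.split₀ "DAL DL AFR AF KLM KL AZA AZ CES MU KQA KQ SVA SV ETD EY VIR VS UAL UA" =
      ["DAL", "DL", "AFR", "AF", "KLM", "KL", "AZA", "AZ", "CES", "MU", "KQA", "KQ", "SVA", "SV", "ETD", "EY", "VIR", "VS", "UAL", "UA"] from by decide,
    show PySem.Str.split₀ "JBU B6 EIN EI SYX SY" = ["JBU", "B6", "EIN", "EI", "SYX", "SY"] from by decide,
    show PySem.Str.split₀ "EWG EW" = ["EWG", "EW"] from by decide,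
    show PySem.Str.split₀ "BAW BA IBE IB ASA AS EWG EW ICE FI UAE EK" =
      ["BAW", "BA", "IBE", "IB", "ASA", "AS", "EWG", "EW", "ICE", "FI", "UAE", "EK"] from by decide,
    show PySem.Str.split₀ "QTR QR" = ["QTR", "QR"] from by decide,
    show PySem.Str.split₀ "AAL AA BAW BA QTR QR CPA CX JAL JL FJI FJ" =
      ["AAL", "AA", "BAW", "BA", "QTR", "QR", "CPA", "CX", "JAL", "JL", "FJI", "FJ"] from by decide]
  rw [show ((["1", "1A", "2", "3", "4", "5", "6", "7"] : List String).length : Int) = 8 from rfl,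
      show ((["2", "3", "4", "5", "6", "C"] : List String).length : Int) = 6 from rfl,
      show ((["1", "2", "3", "4", "5", "6"] : List String).length : Int) = 6 from rfl,
      pv_ite_nest _ _ (pv_sub4 airline), pv_ite_nest _ _ (pv_sub7 airline),
      pv_ite_nest _ _ (pv_sub8 airline)]

theorem pv_lookup_none (a : String) (h1 : a ≠ "LSZH") (h2 : a ≠ "LSGG") (h3 : a ≠ "LFSB")
    (h4 : a ≠ "EGLL") (h5 : a ≠ "KJFK") : List.lookup a pvTable = none := by
  have e1 : (a == "LSZH") = false := beq_eq_false_iff_ne.mpr h1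
  have e2 : (a == "LSGG") = false := beq_eq_false_iff_ne.mpr h2
  have e3 : (a == "LFSB") = false := beq_eq_false_iff_ne.mpr h3
  have e4 : (a == "EGLL") = false := beq_eq_false_iff_ne.mpr h4
  have e5 : (a == "KJFK") = false := beq_eq_false_iff_ne.mpr h5
  simp only [pvTable, List.lookup, e1, e2, e3, e4, e5]

-- ===== VERDICT (by name: the statement is the Claim_ definition above) =====
set_option maxHeartbeats 1000000 in
theorem get_checkin_area_spec : Claim_equal_get_checkin_area := by
  intro callsign airport_code _
  unfold Spec_get_checkin_area get_checkin_area get_checkin_area_alt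
  by_cases hc : callsign = ""
  · rw [if_pos hc, if_pos hc]
  · rw [if_neg hc, if_neg hc]
    by_cases h1 : airport_code = "LSZH"
    · subst h1; rw [if_pos rfl]
      simp only [show List.lookup "LSZH" pvTable = some ([("SWR EDW DLH AUA BEL CTN AEE DLA", fun _ => "1"),
          ("EZY EZS PGT BTI", fun _ => "3")], fun _ => "2") from rfl, pvScan,
        show PySem.Str.split₀ "SWR EDW DLH AUA BEL CTN AEE DLA" =
          ["SWR", "EDW", "DLH", "AUA", "BEL", "CTN", "AEE", "DLA"] from by decide,
        show PySem.Str.split₀ "EZY EZS PGT BTI" = ["EZY", "EZS", "PGT", "BTI"] from by decide]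
    · by_cases h2 : airport_code = "LSGG"
      · subst h2
        rw [if_neg (by decide), if_pos rfl,
          show List.lookup "LSGG" pvTable = some ([("EXS TOM TRA JAI", fun s => "T2-" ++ PySem.Int.toStr (PySem.Int.mod s 10 + 80)),
            ("AFR", fun s => "F" ++ PySem.Int.toStr (PySem.Int.mod s 8 + 70)),
            ("SWR LX EDW DLH UAE ETD QTR", fun s => pvPad2 (PySem.Int.mod s 15 + 1))],
            fun s => pvPad2 (PySem.Int.mod s 30 + 20)) from rfl]
        exact (pv_lsgg (pvAirline callsign) (pvSeed callsign)).symm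
      · by_cases h3 : airport_code = "LFSB"
        · subst h3; rw [if_neg (by decide), if_neg (by decide), if_pos rfl]
          simp only [show List.lookup "LFSB" pvTable = some ([("AFR WZZ RYR ENT",
              fun s => "F" ++ PySem.Int.toStr (PySem.Int.mod s 15 + 60))],
              fun s => pvPad2 (PySem.Int.mod s 40 + 1)) from rfl, pvScan,
            show PySem.Str.split₀ "AFR WZZ RYR ENT" = ["AFR", "WZZ", "RYR", "ENT"] from by decide]
        · by_cases h4 : airport_code = "EGLL"
          · subst h4
            rw [if_neg (by decide), if_neg (by decide), if_neg (by decide), if_pos rfl]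
            simp only [show List.lookup "EGLL" pvTable = some ([("BAW SHT IBE AAL AER EIN", fun s => PySem.Int.toStr (PySem.Int.mod s 40 + 501)),
                ("DLH SWR AUA SAS UAL ACA SIA THA ANA UAE QFA VIR DAL LOT", fun s => PySem.Int.toStr (PySem.Int.mod s 30 + 301)),
                ("KLM AFR CES KQA ETD MAS RAM", fun s => PySem.Int.toStr (PySem.Int.mod s 25 + 401)),
                ("BEL TAP AIC LH AUA", fun s => PySem.Int.toStr (PySem.Int.mod s 20 + 201))],
                fun s => PySem.Int.toStr (PySem.Int.mod s 20 + 221)) from rfl, pvScan,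
              show PySem.Str.split₀ "BAW SHT IBE AAL AER EIN" = ["BAW", "SHT", "IBE", "AAL", "AER", "EIN"] from by decide,
              show PySem.Str.split₀ "DLH SWR AUA SAS UAL ACA SIA THA ANA UAE QFA VIR DAL LOT" =
                ["DLH", "SWR", "AUA", "SAS", "UAL", "ACA", "SIA", "THA", "ANA", "UAE", "QFA", "VIR", "DAL", "LOT"] from by decide,
              show PySem.Str.split₀ "KLM AFR CES KQA ETD MAS RAM" = ["KLM", "AFR", "CES", "KQA", "ETD", "MAS", "RAM"] from by decide,
              show PySem.Str.split₀ "BEL TAP AIC LH AUA" = ["BEL", "TAP", "AIC", "LH", "AUA"] from by decide]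
          · by_cases h5 : airport_code = "KJFK"
            · subst h5
              rw [if_neg (by decide), if_neg (by decide), if_neg (by decide), if_neg (by decide),
                if_pos rfl]
              rw [show List.lookup "KJFK" pvTable = some ((pvTable.getD 4 ("", ([], pvGeneric))).2) from rfl]
              exact (pv_kjfk (pvAirline callsign) (pvSeed callsign)).symm
            · rw [if_neg h1, if_neg h2, if_neg h3, if_neg h4, if_neg h5,
                pv_lookup_none airport_code h1 h2 h3 h4 h5]
              rfl
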